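-- pv_equiv track=rewrite | github.com/duolicious/duolicious-backend | antiabuse/lodgereport/__init__.py | _photo_links_to_html
-- ===== SOURCE A (Python) =====
-- def _photo_links_to_html(photo_links):
--     def link_to_html(photo_link):
--         return f'''
--             <img src="{photo_link}" style="max-width: 200px;
--             max-height: 200px; width: auto; height: auto;
--             border: 1px solid black;">
--             '''
--
--     return ''.join(
--         link_to_html(l) + ('<br>' if ((i + 1) % 3 == 0 and i > 0) else '')
--         for i, l in enumerate(photo_links)
--     )
-- ===== SOURCE B (Python) =====
-- def _photo_links_to_html(photo_links):
--     def link_to_html(photo_link):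
--         return f'''
--             <img src="{photo_link}" style="max-width: 200px;
--             max-height: 200px; width: auto; height: auto;
--             border: 1px solid black;">
--             '''
--
--     pieces = []
--     chunk = []
--     for l in photo_links:
--         chunk = chunk + [l]
--         if len(chunk) == 3:
--             pieces.append(''.join(link_to_html(c) for c in chunk) + '<br>')
--             chunk = []
--     if chunk:
--         pieces.append(''.join(link_to_html(c) for c in chunk))
--     return ''.join(pieces)
-- ===== Notes on version B (the rewrite author's own statement) =====
-- stated objective: alternative
-- what changed: Replaced the enumerate-with-modulo-check join by a single pass that accumulates a chunk buffer of up to 3 links, emitting one joined piece (plus '<br>') per full chunk and a final piece for a short remainder.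
import Mathlib
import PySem

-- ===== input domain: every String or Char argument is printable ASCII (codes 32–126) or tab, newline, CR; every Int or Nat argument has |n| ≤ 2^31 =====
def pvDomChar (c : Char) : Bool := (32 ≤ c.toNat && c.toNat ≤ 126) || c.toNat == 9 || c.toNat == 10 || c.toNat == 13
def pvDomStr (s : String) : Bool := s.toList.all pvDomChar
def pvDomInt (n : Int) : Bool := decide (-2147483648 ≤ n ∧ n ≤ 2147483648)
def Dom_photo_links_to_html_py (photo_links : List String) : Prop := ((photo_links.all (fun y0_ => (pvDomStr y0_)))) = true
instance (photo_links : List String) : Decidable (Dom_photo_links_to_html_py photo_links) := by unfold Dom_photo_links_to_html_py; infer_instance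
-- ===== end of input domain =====

-- B replaces the enumerate + modulo check by a single pass with a chunk buffer: a piece per group of 3, '<br>' after full groups; same output, different decomposition.


-- ===== PORT A =====
-- the inner helper link_to_html (an f-string; string concatenation is exact)
def pvLinkToHtml (photo_link : String) : String :=
  "\n            <img src=\"" ++ photo_link ++ "\" style=\"max-width: 200px;\n            max-height: 200px; width: auto; height: auto;\n            border: 1px solid black;\">\n            "

-- ''.join over the enumerate generator expression
def photo_links_to_html_py (photo_links : List String) : String :=
  PySem.Str.join ""
    ((PySem.List.enumerate photo_links 0).map
      (fun p => pvLinkToHtml p.2 ++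
        (if PySem.Int.mod (p.1 + 1) 3 == 0 && decide (p.1 > 0) then "<br>" else "")))

-- ===== PORT B =====
-- Source B's loop body: chunk = chunk + [l]; if len(chunk) == 3: pieces.append(join + '<br>'); chunk = []
def pvAltStep (st : List String × List String) (l : String) : List String × List String :=
  let chunk := st.2 ++ [l]
  if chunk.length == 3 then
    (st.1 ++ [PySem.Str.join "" (chunk.map pvLinkToHtml) ++ "<br>"], [])
  else
    (st.1, chunk)

def photo_links_to_html_py_alt (photo_links : List String) : String :=
  let r := photo_links.foldl pvAltStep ([], [])
  -- if chunk: pieces.append(''.join(link_to_html(c) for c in chunk))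
  let pieces := r.1 ++ (if r.2.isEmpty then [] else [PySem.Str.join "" (r.2.map pvLinkToHtml)])
  PySem.Str.join "" pieces

-- ===== PRECONDITION & SPEC =====
def Spec_photo_links_to_html_py (photo_links : List String) (out : String) : Prop := out = photo_links_to_html_py_alt photo_links
instance (photo_links : List String) (out : String) : Decidable (Spec_photo_links_to_html_py photo_links out) := by unfold Spec_photo_links_to_html_py; infer_instance

-- ===== CLAIM (what is proved, stated in full; the proofs are below) =====
def Claim_equal_photo_links_to_html_py : Prop := ∀ (photo_links : List String), Dom_photo_links_to_html_py photo_links → Spec_photo_links_to_html_py photo_links (photo_links_to_html_py photo_links)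

-- ===== LEMMAS AND PROOFS =====

-- proof-layer bridge: the list of pieces, described by chunking the input three at a time
def pvAltChunks : List String → List String
  | [] => []
  | x :: t =>
      (PySem.Str.join "" (((x :: t).take 3).map pvLinkToHtml) ++
        (if ((x :: t).take 3).length == 3 then "<br>" else ""))
      :: pvAltChunks ((x :: t).drop 3)
termination_by rest => rest.length
decreasing_by simp [List.length_drop]

-- flattening an intersperse with an empty separator is plain flattening
theorem pv_flat_inter {α : Type} (l : List (List α)) :
    (List.intersperse ([] : List α) l).flatten = l.flatten := by
  match l with
  | [] => rfl
  | [a] => rfl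
  | a :: b :: t =>
      rw [show List.intersperse ([] : List α) (a :: b :: t) = a :: [] :: List.intersperse [] (b :: t) from rfl]
      simp [pv_flat_inter (b :: t)]

-- A's join over the enumeration starting at any multiple of 3 equals the chunked join
theorem pv_main (xs : List String) (k : Int) (hk : 0 ≤ k) (h3 : k % 3 = 0) :
    PySem.Str.join ""
      ((PySem.List.enumerate xs k).map
        (fun p => pvLinkToHtml p.2 ++
          (if PySem.Int.mod (p.1 + 1) 3 == 0 && decide (p.1 > 0) then "<br>" else ""))) =
    PySem.Str.join "" (pvAltChunks xs) := by
  match xs with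
  | [] => simp [PySem.List.enumerate_nil, pvAltChunks, PySem.Str.join, PySem.Chars.join, List.intercalate]
  | [a] =>
      simp [PySem.List.enumerate_cons, PySem.List.enumerate_nil, pvAltChunks,
        PySem.Str.join, PySem.Chars.join, List.intercalate, show ¬ ((3:Int) ∣ k + 1) by omega]
  | [a, b] =>
      simp [PySem.List.enumerate_cons, PySem.List.enumerate_nil, pvAltChunks,
        PySem.Str.join, PySem.Chars.join, List.intercalate,
        show ¬ ((3:Int) ∣ k + 1) by omega, show ¬ ((3:Int) ∣ k + 1 + 1) by omega]
  | a :: b :: c :: t =>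
      have ih := pv_main t (k + 3) (by omega) (by omega)
      replace ih := String.ofList_inj.mp ih
      have hc : k + 1 + 1 + 1 = k + 3 := by ring
      simp [PySem.List.enumerate_cons, pvAltChunks, PySem.Str.join, PySem.Chars.join, List.intercalate, hc,
        show ¬ ((3:Int) ∣ k + 1) by omega, show ¬ ((3:Int) ∣ k + 1 + 1) by omega,
        show (3:Int) ∣ k by omega, show (0:Int) < k + 1 + 1 by omega, pv_flat_inter] at *
      simp [ih]
termination_by xs.length
decreasing_by simp; omega

-- B's fold with an empty chunk buffer produces exactly the chunked pieces
theorem pv_fold3 (xs out : List String) :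
    (xs.foldl pvAltStep (out, [])).1 ++
      (if (xs.foldl pvAltStep (out, [])).2.isEmpty then []
       else [PySem.Str.join "" ((xs.foldl pvAltStep (out, [])).2.map pvLinkToHtml)]) =
    out ++ pvAltChunks xs := by
  match xs with
  | [] => simp [pvAltChunks]
  | [a] => simp [pvAltStep, pvAltChunks, PySem.Str.join]
  | [a, b] => simp [pvAltStep, pvAltChunks, PySem.Str.join]
  | a :: b :: c :: t =>
      have ih := pv_fold3 t (out ++ [PySem.Str.join "" ([a, b, c].map pvLinkToHtml) ++ "<br>"])
      simp only [List.foldl, pvAltStep] at *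
      simp at *
      simpa [pvAltChunks] using ih
termination_by xs.length
decreasing_by simp; omega

-- ===== VERDICT (by name: the statement is the Claim_ definition above) =====
theorem photo_links_to_html_py_spec : Claim_equal_photo_links_to_html_py := by
  intro xs _
  have h := pv_fold3 xs []
  simp only [List.nil_append] at h
  simp only [Spec_photo_links_to_html_py, photo_links_to_html_py, photo_links_to_html_py_alt, h]
  exact pv_main xs 0 le_rfl rfl
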